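-- pv_equiv track=rewrite | github.com/DrubinBarnes/Jin_Shirazinejad_et_al_branched_actin_manuscript | analysis/simplified_workflow_airyscan/cmeAnalysisPostProcessingSimplified/.ipynb_checkpoints/display_tracks-checkpoint.py | create_tp_tn_fp_fn_labels
-- ===== SOURCE A (Python) =====
-- def create_tp_tn_fp_fn_labels(test_labels, predicted_labels):
--     """
--     Find indices for true positives, false negatives, false positives, and false negativess from ground truth and predicted labels
--
--     Args:
--         test_labels (list): list of ground-truth labels
--         predicted_labels (list): list of predicted labels
--
--     Returns:
--         predicted_labels (list of lists): lists (in order: tp, tn, fp, fn) of indices of prediction outcomes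
--
--     """
--
--
--     if len(test_labels)!=len(predicted_labels):
--         raise Exception('arrays must be equal in size')
--
--     tp = []
--     tn = []
--     fp = []
--     fn = []
--
--     for i in range(len(test_labels)):
--
--         if test_labels[i]==1 and predicted_labels[i]==1:
--             tp.append(i)
--         elif test_labels[i]==0 and predicted_labels[i]==0:
--             tn.append(i)
--         elif test_labels[i]==0 and predicted_labels[i]==1:
--             fp.append(i)
--         elif test_labels[i]==1 and predicted_labels[i]==0:
--             fn.append(i)
--
--     return [tp,tn,fp,fn]
-- ===== SOURCE B (Python) =====
-- def create_tp_tn_fp_fn_labels(test_labels, predicted_labels):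
--     if len(test_labels) != len(predicted_labels):
--         raise Exception('arrays must be equal in size')
--     pairs = list(zip(test_labels, predicted_labels))
--
--     def bucket(key):
--         return [i for i, pair in enumerate(pairs) if pair == key]
--
--     return [bucket((1, 1)), bucket((0, 0)), bucket((0, 1)), bucket((1, 0))]
-- ===== Notes on version B (the rewrite author's own statement) =====
-- stated objective: idiomatic
-- what changed: Replaces A's single pass with four branch-selected accumulator lists by four staged comprehension passes over the zipped pairs, one per (truth, prediction) bucket.
import Mathlib
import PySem

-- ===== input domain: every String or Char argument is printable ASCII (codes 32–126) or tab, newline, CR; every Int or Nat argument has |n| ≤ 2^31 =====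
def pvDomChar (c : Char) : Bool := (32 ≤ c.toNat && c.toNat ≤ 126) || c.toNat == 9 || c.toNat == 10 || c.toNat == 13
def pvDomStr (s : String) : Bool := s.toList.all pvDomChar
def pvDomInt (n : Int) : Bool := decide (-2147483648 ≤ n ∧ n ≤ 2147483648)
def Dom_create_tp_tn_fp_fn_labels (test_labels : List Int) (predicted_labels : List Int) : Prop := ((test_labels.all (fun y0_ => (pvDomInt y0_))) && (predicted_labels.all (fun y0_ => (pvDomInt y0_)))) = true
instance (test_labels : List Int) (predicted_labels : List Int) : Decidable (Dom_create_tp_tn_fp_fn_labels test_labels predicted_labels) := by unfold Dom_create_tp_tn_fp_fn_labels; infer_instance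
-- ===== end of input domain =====

-- B replaces A's single pass with four branch-selected accumulators by four staged comprehension passes, one per (truth, prediction) bucket (idiomatic; same cost).


-- ===== PORT A =====
def create_tp_tn_fp_fn_labels (test_labels : List Int) (predicted_labels : List Int) : List (List Int) :=
  -- for i in range(len(test_labels)): four accumulator lists, branch-selected append
  let s := (PySem.List.pyRange 0 (test_labels.length : Int) 1).foldl
    (fun (s : List Int × List Int × List Int × List Int) i =>
      if PySem.List.pyGetD test_labels i 0 = 1 ∧ PySem.List.pyGetD predicted_labels i 0 = 1 then
        (s.1 ++ [i], s.2.1, s.2.2.1, s.2.2.2)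
      else if PySem.List.pyGetD test_labels i 0 = 0 ∧ PySem.List.pyGetD predicted_labels i 0 = 0 then
        (s.1, s.2.1 ++ [i], s.2.2.1, s.2.2.2)
      else if PySem.List.pyGetD test_labels i 0 = 0 ∧ PySem.List.pyGetD predicted_labels i 0 = 1 then
        (s.1, s.2.1, s.2.2.1 ++ [i], s.2.2.2)
      else if PySem.List.pyGetD test_labels i 0 = 1 ∧ PySem.List.pyGetD predicted_labels i 0 = 0 then
        (s.1, s.2.1, s.2.2.1, s.2.2.2 ++ [i])
      else s)
    ([], [], [], [])
  [s.1, s.2.1, s.2.2.1, s.2.2.2]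

-- ===== PORT B =====
-- bucket(key) = [i for i, pair in enumerate(pairs) if pair == key]
def pvBucketB (pairs : List (Int × Int)) (key : Int × Int) : List Int :=
  ((PySem.List.enumerate pairs 0).filter (fun ip => ip.2 == key)).map (·.1)

def create_tp_tn_fp_fn_labels_alt (test_labels : List Int) (predicted_labels : List Int) : List (List Int) :=
  let pairs := test_labels.zip predicted_labels
  [pvBucketB pairs (1, 1), pvBucketB pairs (0, 0), pvBucketB pairs (0, 1), pvBucketB pairs (1, 0)]

-- ===== PRECONDITION & SPEC =====
-- Pre_ excludes exactly the inputs where A raises ('arrays must be equal in size').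
def Pre_create_tp_tn_fp_fn_labels (test_labels : List Int) (predicted_labels : List Int) : Prop :=
  test_labels.length = predicted_labels.length
instance (test_labels : List Int) (predicted_labels : List Int) : Decidable (Pre_create_tp_tn_fp_fn_labels test_labels predicted_labels) := by unfold Pre_create_tp_tn_fp_fn_labels; infer_instance
def pvWitness_create_tp_tn_fp_fn_labels : List Int × List Int := ([1, 0, 2], [1, 1, 0])
def Spec_create_tp_tn_fp_fn_labels (test_labels : List Int) (predicted_labels : List Int) (out : List (List Int)) : Prop := out = create_tp_tn_fp_fn_labels_alt test_labels predicted_labels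
instance (test_labels : List Int) (predicted_labels : List Int) (out : List (List Int)) : Decidable (Spec_create_tp_tn_fp_fn_labels test_labels predicted_labels out) := by unfold Spec_create_tp_tn_fp_fn_labels; infer_instance

-- ===== CLAIM (what is proved, stated in full; the proofs are below) =====
def Claim_equal_create_tp_tn_fp_fn_labels : Prop := ∀ (test_labels : List Int) (predicted_labels : List Int), Dom_create_tp_tn_fp_fn_labels test_labels predicted_labels → Pre_create_tp_tn_fp_fn_labels test_labels predicted_labels → Spec_create_tp_tn_fp_fn_labels test_labels predicted_labels (create_tp_tn_fp_fn_labels test_labels predicted_labels)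

-- ===== LEMMAS AND PROOFS =====

-- A's fold, on any index list, appends to each accumulator the indices whose (truth, prediction) pair is that bucket's key.
lemma foldA_eq (t p : List Int) (L : List Int) (s1 s2 s3 s4 : List Int) :
    L.foldl
      (fun (s : List Int × List Int × List Int × List Int) i =>
        if PySem.List.pyGetD t i 0 = 1 ∧ PySem.List.pyGetD p i 0 = 1 then
          (s.1 ++ [i], s.2.1, s.2.2.1, s.2.2.2)
        else if PySem.List.pyGetD t i 0 = 0 ∧ PySem.List.pyGetD p i 0 = 0 then
          (s.1, s.2.1 ++ [i], s.2.2.1, s.2.2.2)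
        else if PySem.List.pyGetD t i 0 = 0 ∧ PySem.List.pyGetD p i 0 = 1 then
          (s.1, s.2.1, s.2.2.1 ++ [i], s.2.2.2)
        else if PySem.List.pyGetD t i 0 = 1 ∧ PySem.List.pyGetD p i 0 = 0 then
          (s.1, s.2.1, s.2.2.1, s.2.2.2 ++ [i])
        else s)
      (s1, s2, s3, s4)
    = (s1 ++ L.filter (fun i => (PySem.List.pyGetD t i 0, PySem.List.pyGetD p i 0) == (1, 1)),
       s2 ++ L.filter (fun i => (PySem.List.pyGetD t i 0, PySem.List.pyGetD p i 0) == (0, 0)),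
       s3 ++ L.filter (fun i => (PySem.List.pyGetD t i 0, PySem.List.pyGetD p i 0) == (0, 1)),
       s4 ++ L.filter (fun i => (PySem.List.pyGetD t i 0, PySem.List.pyGetD p i 0) == (1, 0))) := by
  induction L generalizing s1 s2 s3 s4 with
  | nil => simp
  | cons x xs ih =>
    simp only [List.foldl_cons, List.filter_cons]
    by_cases h1 : PySem.List.pyGetD t x 0 = 1 ∧ PySem.List.pyGetD p x 0 = 1
    · simp [h1, ih, Prod.ext_iff, List.append_assoc]
    · by_cases h2 : PySem.List.pyGetD t x 0 = 0 ∧ PySem.List.pyGetD p x 0 = 0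
      · simp [h2, ih, Prod.ext_iff, List.append_assoc]
      · by_cases h3 : PySem.List.pyGetD t x 0 = 0 ∧ PySem.List.pyGetD p x 0 = 1
        · simp [h3, ih, Prod.ext_iff, List.append_assoc]
        · by_cases h4 : PySem.List.pyGetD t x 0 = 1 ∧ PySem.List.pyGetD p x 0 = 0
          · simp [h4, ih, Prod.ext_iff, List.append_assoc]
          · simp [h1, h2, h3, h4, ih, Prod.ext_iff]

-- B's comprehension bucket equals A's pyRange-filter form, when the lists have equal length.
lemma bucketB_eq (t p : List Int) (h : t.length = p.length) (k : Int × Int) :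
    pvBucketB (t.zip p) k
    = (PySem.List.pyRange 0 (t.length : Int) 1).filter
        (fun i => (PySem.List.pyGetD t i 0, PySem.List.pyGetD p i 0) == k) := by
  unfold pvBucketB
  rw [PySem.List.enumerate_eq_map_pyRange (d := ((0 : Int), (0 : Int))), List.filter_map,
    List.map_map]
  have hlen : PySem.List.len (t.zip p) = (t.length : Int) := by
    simp [PySem.List.len, List.length_zip, h]
  rw [hlen]
  have hfc : ∀ i ∈ PySem.List.pyRange 0 (t.length : Int) 1,
      ((fun ip => ip.2 == k) ∘ fun j => (j, PySem.List.pyGetD (t.zip p) j ((0:Int),(0:Int)))) i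
      = (fun i => (PySem.List.pyGetD t i 0, PySem.List.pyGetD p i 0) == k) i := by
    intro i hi
    have hb := (PySem.List.mem_pyRange_one).1 hi
    have h0 : 0 ≤ i := hb.1
    have hlt : i < (t.length : Int) := hb.2
    have hzip : PySem.List.pyGetD (t.zip p) i ((0:Int),(0:Int))
        = (PySem.List.pyGetD t i 0, PySem.List.pyGetD p i 0) := by
      rw [PySem.List.pyGetD_eq_getElem (t.zip p) _ h0 (by simp [List.length_zip]; omega),
        PySem.List.pyGetD_eq_getElem t _ h0 (by omega),
        PySem.List.pyGetD_eq_getElem p _ h0 (by omega)]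
      simp [List.getElem_zip]
    simp [hzip]
  rw [List.filter_congr hfc]
  simp [Function.comp_def, List.map_id']

-- ===== VERDICT (by name: the statement is the Claim_ definition above) =====
theorem create_tp_tn_fp_fn_labels_spec : Claim_equal_create_tp_tn_fp_fn_labels := by
  intro t p _ hpre
  unfold Spec_create_tp_tn_fp_fn_labels create_tp_tn_fp_fn_labels create_tp_tn_fp_fn_labels_alt
  rw [foldA_eq]
  simp only [bucketB_eq t p hpre, List.nil_append]
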